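-- pv_equiv track=rewrite | github.com/steveya/trellis | trellis/agent/evals.py | _stress_artifact_inventory
-- ===== SOURCE A (Python) =====
-- from typing import Any, Iterable, Mapping
--
-- def _stress_artifact_inventory(
--     results_by_id: Mapping[str, Mapping[str, Any]],
-- ) -> dict[str, Any]:
--     inventory = {
--         "latest_run_records": 0,
--         "latest_diagnosis_packets": 0,
--         "latest_diagnosis_dossiers": 0,
--     }
--     for result in results_by_id.values():
--         if result.get("task_run_latest_path"):
--             inventory["latest_run_records"] += 1
--         if result.get("task_diagnosis_latest_packet_path"):
--             inventory["latest_diagnosis_packets"] += 1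
--         if result.get("task_diagnosis_latest_dossier_path"):
--             inventory["latest_diagnosis_dossiers"] += 1
--     return inventory
-- ===== SOURCE B (Python) =====
-- def _stress_artifact_inventory(results_by_id):
--     vals = list(results_by_id.values())
--     return {
--         "latest_run_records": sum(1 for r in vals if r.get("task_run_latest_path")),
--         "latest_diagnosis_packets": sum(1 for r in vals if r.get("task_diagnosis_latest_packet_path")),
--         "latest_diagnosis_dossiers": sum(1 for r in vals if r.get("task_diagnosis_latest_dossier_path")),
--     }
-- ===== Notes on version B (the rewrite author's own statement) =====
-- stated objective: simpler
-- what changed: Replaces the single fused loop that mutates a three-counter dict with three independent sum-reductions over the values, one per inventory key, assembled directly into the returned dict.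
import Mathlib
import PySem

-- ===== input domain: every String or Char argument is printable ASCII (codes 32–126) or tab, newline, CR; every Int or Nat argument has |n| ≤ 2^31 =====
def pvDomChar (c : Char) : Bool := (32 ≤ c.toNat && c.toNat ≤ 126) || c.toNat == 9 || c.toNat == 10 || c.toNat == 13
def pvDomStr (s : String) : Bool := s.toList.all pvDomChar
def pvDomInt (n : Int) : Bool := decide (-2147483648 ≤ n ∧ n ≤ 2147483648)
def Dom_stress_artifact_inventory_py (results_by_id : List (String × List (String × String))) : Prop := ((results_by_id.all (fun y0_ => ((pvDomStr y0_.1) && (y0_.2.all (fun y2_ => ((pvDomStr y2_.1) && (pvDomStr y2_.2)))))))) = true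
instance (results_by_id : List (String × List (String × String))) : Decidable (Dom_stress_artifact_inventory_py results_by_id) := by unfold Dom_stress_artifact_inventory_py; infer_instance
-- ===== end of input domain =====

-- B replaces A's single fused counting loop by three independent reductions, one per inventory key (objective: simpler).


-- ===== PORT A =====
-- result.get(k): first-match lookup in the inner dict; Python truthiness of the result (None and "" are falsy)
def pvTruthyGet (r : List (String × String)) (k : String) : Bool :=
  match (PySem.Dict.mk r).get? k with
  | some s => !(s == "")
  | none => false

-- the body of A's 'for result in results_by_id.values():' loop
def pvLoopStep (inv : PySem.Dict String Int) (result : List (String × String)) : PySem.Dict String Int :=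
  let inv := if pvTruthyGet result "task_run_latest_path" then inv.modify "latest_run_records" 0 (· + 1) else inv
  let inv := if pvTruthyGet result "task_diagnosis_latest_packet_path" then inv.modify "latest_diagnosis_packets" 0 (· + 1) else inv
  if pvTruthyGet result "task_diagnosis_latest_dossier_path" then inv.modify "latest_diagnosis_dossiers" 0 (· + 1) else inv

def stress_artifact_inventory_py (results_by_id : List (String × List (String × String))) : List (String × Int) :=
  let inventory : PySem.Dict String Int :=
    ((PySem.Dict.empty.insert "latest_run_records" 0).insert "latest_diagnosis_packets" 0).insert "latest_diagnosis_dossiers" 0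
  let inventory := (results_by_id.map (·.2)).foldl pvLoopStep inventory
  inventory.items

-- ===== PORT B =====
def stress_artifact_inventory_py_alt (results_by_id : List (String × List (String × String))) : List (String × Int) :=
  let vals := results_by_id.map (·.2)
  [("latest_run_records", (vals.countP (fun r => pvTruthyGet r "task_run_latest_path") : Int)),
   ("latest_diagnosis_packets", (vals.countP (fun r => pvTruthyGet r "task_diagnosis_latest_packet_path") : Int)),
   ("latest_diagnosis_dossiers", (vals.countP (fun r => pvTruthyGet r "task_diagnosis_latest_dossier_path") : Int))]

-- ===== PRECONDITION & SPEC =====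
def Spec_stress_artifact_inventory_py (results_by_id : List (String × List (String × String))) (out : List (String × Int)) : Prop := out = stress_artifact_inventory_py_alt results_by_id
instance (results_by_id : List (String × List (String × String))) (out : List (String × Int)) : Decidable (Spec_stress_artifact_inventory_py results_by_id out) := by unfold Spec_stress_artifact_inventory_py; infer_instance

-- ===== CLAIM (what is proved, stated in full; the proofs are below) =====
def Claim_equal_stress_artifact_inventory_py : Prop := ∀ (results_by_id : List (String × List (String × String))), Dom_stress_artifact_inventory_py results_by_id → Spec_stress_artifact_inventory_py results_by_id (stress_artifact_inventory_py results_by_id)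

-- ===== LEMMAS AND PROOFS =====
theorem pvLoopStep_mk (a b c : Int) (v : List (String × String)) :
    pvLoopStep (PySem.Dict.mk [("latest_run_records", a), ("latest_diagnosis_packets", b), ("latest_diagnosis_dossiers", c)]) v
    = PySem.Dict.mk [("latest_run_records", a + (if pvTruthyGet v "task_run_latest_path" then 1 else 0)),
                     ("latest_diagnosis_packets", b + (if pvTruthyGet v "task_diagnosis_latest_packet_path" then 1 else 0)),
                     ("latest_diagnosis_dossiers", c + (if pvTruthyGet v "task_diagnosis_latest_dossier_path" then 1 else 0))] := by
  by_cases h1 : pvTruthyGet v "task_run_latest_path" <;>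
    by_cases h2 : pvTruthyGet v "task_diagnosis_latest_packet_path" <;>
    by_cases h3 : pvTruthyGet v "task_diagnosis_latest_dossier_path" <;>
    simp [pvLoopStep, h1, h2, h3, PySem.Dict.modify, PySem.Dict.insert, PySem.Dict.getD,
      PySem.Dict.get?, PySem.Dict.contains]

theorem pv_loop_items (vals : List (List (String × String))) (a b c : Int) :
    (vals.foldl pvLoopStep
      (PySem.Dict.mk [("latest_run_records", a), ("latest_diagnosis_packets", b), ("latest_diagnosis_dossiers", c)])).items
    = [("latest_run_records", a + (vals.countP (fun r => pvTruthyGet r "task_run_latest_path") : Int)),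
       ("latest_diagnosis_packets", b + (vals.countP (fun r => pvTruthyGet r "task_diagnosis_latest_packet_path") : Int)),
       ("latest_diagnosis_dossiers", c + (vals.countP (fun r => pvTruthyGet r "task_diagnosis_latest_dossier_path") : Int))] := by
  induction vals generalizing a b c with
  | nil => simp
  | cons v vs ih =>
    rw [List.foldl_cons, pvLoopStep_mk, ih]
    by_cases h1 : pvTruthyGet v "task_run_latest_path" <;>
      by_cases h2 : pvTruthyGet v "task_diagnosis_latest_packet_path" <;>
      by_cases h3 : pvTruthyGet v "task_diagnosis_latest_dossier_path" <;>
      simp [h1, h2, h3] <;> omega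

-- ===== VERDICT (by name: the statement is the Claim_ definition above) =====
theorem stress_artifact_inventory_py_spec : Claim_equal_stress_artifact_inventory_py := by
  intro results_by_id _
  unfold Spec_stress_artifact_inventory_py stress_artifact_inventory_py stress_artifact_inventory_py_alt
  have h0 : ((PySem.Dict.empty.insert "latest_run_records" (0:Int)).insert "latest_diagnosis_packets" 0).insert "latest_diagnosis_dossiers" 0
      = PySem.Dict.mk [("latest_run_records", 0), ("latest_diagnosis_packets", 0), ("latest_diagnosis_dossiers", 0)] := by decide
  simp only [h0, pv_loop_items, zero_add]
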